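-- pv_equiv track=rewrite | github.com/AGONIXX15/automata_and_grammar | Model/state_machine.py | fsm_mod3
-- ===== SOURCE A (Python) =====
-- def fsm_mod3(string: str):
--     """estados vienen siendo q0 = 0, q1 = 1 q2 = 2
--     pq vamos a calcular solo el modulo de 3
--     formula de estado (residuo * 2 + bit) % 3"""
--     # q0 estado inicial
--     state: int = 0
--
--     transitions = {
--         0: {'0': 0, '1': 1},
--         1: {'0': 2, '1': 0},
--         2: {'0': 1, '1': 2}
--     }
--
--     for bit in string:
--         state = transitions[state][bit]
--
--     return state
-- ===== SOURCE B (Python) =====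
-- def fsm_mod3(string: str):
--     # Positional method instead of a state machine: 2**i % 3 alternates 1, 2
--     # for i = 0, 1, 2, ..., so the value mod 3 is the weighted digit sum
--     # sum(weight(i) * bit_i) % 3 taken over the string read right to left.
--     value = {'0': 0, '1': 1}
--     total = 0
--     for i, bit in enumerate(reversed(string)):
--         total += value[bit] if i % 2 == 0 else 2 * value[bit]
--     return total % 3
-- ===== Notes on version B (the rewrite author's own statement) =====
-- stated objective: alternative
-- what changed: Replaces the left-to-right DFA over a 3x2 transition table with a positional weighted digit sum: since 2**i mod 3 alternates 1,2, B scans the string right to left, adds weight(i)*bit with alternating weights 1 and 2, and takes a single final mod 3.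
import Mathlib
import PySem

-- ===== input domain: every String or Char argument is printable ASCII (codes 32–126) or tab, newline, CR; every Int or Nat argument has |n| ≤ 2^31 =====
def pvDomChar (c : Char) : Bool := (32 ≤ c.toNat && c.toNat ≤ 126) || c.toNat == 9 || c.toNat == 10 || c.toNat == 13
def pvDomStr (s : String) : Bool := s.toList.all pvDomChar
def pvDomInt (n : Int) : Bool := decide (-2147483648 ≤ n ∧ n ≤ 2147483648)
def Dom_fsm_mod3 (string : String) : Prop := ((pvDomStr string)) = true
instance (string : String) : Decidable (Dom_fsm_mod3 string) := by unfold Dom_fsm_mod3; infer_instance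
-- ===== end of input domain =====

-- B replaces A's left-to-right DFA over a transition table with a positional weighted
-- digit sum (2^i mod 3 alternates 1,2) over the reversed string, one final mod 3
-- (objective: alternative).


-- ===== PORT A =====
-- the literal nested dict from A
def pvTransA : PySem.Dict Int (PySem.Dict Char Int) :=
  PySem.Dict.ofList
    [(0, PySem.Dict.ofList [('0', 0), ('1', 1)]),
     (1, PySem.Dict.ofList [('0', 2), ('1', 0)]),
     (2, PySem.Dict.ofList [('0', 1), ('1', 2)])]

-- transitions[state][bit]; none = Python's KeyError (excluded by Pre_)
def pvStepA (s : Option Int) (bit : Char) : Option Int :=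
  s.bind fun st => (pvTransA.get? st).bind fun row => row.get? bit

def fsm_mod3 (string : String) : Int :=
  (string.toList.foldl pvStepA (some 0)).getD 0

-- ===== PORT B =====
def pvValB : PySem.Dict Char Int := PySem.Dict.ofList [('0', 0), ('1', 1)]

-- total += value[bit] if i % 2 == 0 else 2 * value[bit]; none = KeyError (excluded by Pre_)
def pvStepB (acc : Option Int) (p : Int × Char) : Option Int :=
  acc.bind fun tot => (pvValB.get? p.2).map fun v =>
    tot + (if PySem.Int.mod p.1 2 = 0 then v else 2 * v)

def fsm_mod3_alt (string : String) : Int :=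
  (((PySem.List.enumerate string.toList.reverse).foldl pvStepB (some 0)).map
    (fun t => PySem.Int.mod t 3)).getD 0

-- ===== PRECONDITION & SPEC =====
-- Pre_ excludes exactly the strings containing a non-binary character, on which A raises KeyError.
def Pre_fsm_mod3 (string : String) : Prop := (string.toList.all fun c => c == '0' || c == '1') = true
instance (string : String) : Decidable (Pre_fsm_mod3 string) := by unfold Pre_fsm_mod3; infer_instance
def pvWitness_fsm_mod3 : String := "10"

def Spec_fsm_mod3 (string : String) (out : Int) : Prop := out = fsm_mod3_alt string
instance (string : String) (out : Int) : Decidable (Spec_fsm_mod3 string out) := by unfold Spec_fsm_mod3; infer_instance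

-- ===== CLAIM (what is proved, stated in full; the proofs are below) =====
def Claim_equal_fsm_mod3 : Prop := ∀ (string : String), Dom_fsm_mod3 string → Pre_fsm_mod3 string → Spec_fsm_mod3 string (fsm_mod3 string)

-- ===== LEMMAS AND PROOFS =====

-- the integer value of a binary digit
def pvBit (c : Char) : Int := if c = '1' then 1 else 0

-- binary value accumulated left to right (mirrors A's recurrence before reduction mod 3)
def pvValStep (x : Int) (c : Char) : Int := 2 * x + pvBit c

-- binary value of a digit list read LSB-first
def pvN : List Char → Int
  | [] => 0
  | c :: t => pvBit c + 2 * pvN t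

-- B's weighted digit sum starting at index k
def pvWsum (k : Int) : List Char → Int
  | [] => 0
  | c :: t => (if k % 2 = 0 then pvBit c else 2 * pvBit c) + pvWsum (k + 1) t

theorem pvStepA_closed (s : Int) (c : Char) (hs : s = 0 ∨ s = 1 ∨ s = 2)
    (hc : c = '0' ∨ c = '1') :
    pvStepA (some s) c = some ((2 * s + pvBit c) % 3) := by
  rcases hs with h | h | h <;> rcases hc with hc | hc <;> subst h <;> subst hc <;> decide

theorem pvStepA_eq (a : Int) (c : Char) (hc : c = '0' ∨ c = '1') :
    pvStepA (some (a % 3)) c = some ((2 * a + pvBit c) % 3) := by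
  rw [pvStepA_closed (a % 3) c (by omega) hc]
  congr 1
  omega

theorem pvFoldA (l : List Char) (hl : ∀ c ∈ l, c = '0' ∨ c = '1') (a : Int) :
    l.foldl pvStepA (some (a % 3)) = some ((l.foldl pvValStep a) % 3) := by
  induction l generalizing a with
  | nil => rfl
  | cons c t ih =>
    simp only [List.foldl_cons]
    rw [pvStepA_eq a c (hl c List.mem_cons_self)]
    exact ih (fun d hd => hl d (List.mem_cons_of_mem _ hd)) (pvValStep a c)

theorem pvRevVal (r : List Char) :
    r.reverse.foldl pvValStep 0 = pvN r := by
  induction r with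
  | nil => rfl
  | cons c t ih =>
    simp only [List.reverse_cons, List.foldl_append, List.foldl_cons, List.foldl_nil, ih]
    simp only [pvValStep, pvN]
    ring

theorem pvValB_bit (c : Char) (hc : c = '0' ∨ c = '1') :
    pvValB.get? c = some (pvBit c) := by
  rcases hc with h | h <;> subst h <;> decide

theorem pvFoldB (r : List Char) (hr : ∀ c ∈ r, c = '0' ∨ c = '1') :
    ∀ (k tot : Int), 0 ≤ k →
      (PySem.List.enumerate r k).foldl pvStepB (some tot) = some (tot + pvWsum k r) := by
  induction r with
  | nil => intro k tot _; simp [PySem.List.enumerate_nil, pvWsum]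
  | cons c t ih =>
    intro k tot hk
    rw [PySem.List.enumerate_cons]
    simp only [List.foldl_cons]
    have hstep : pvStepB (some tot) (k, c) =
        some (tot + (if k % 2 = 0 then pvBit c else 2 * pvBit c)) := by
      unfold pvStepB
      rw [pvValB_bit c (hr c List.mem_cons_self),
        PySem.Int.mod_eq_emod_of_pos (show (0:Int) < 2 by norm_num)]
      rfl
    rw [hstep, ih (fun d hd => hr d (List.mem_cons_of_mem _ hd)) (k + 1) _ (by omega)]
    congr 1
    simp only [pvWsum]
    ring

theorem pvWsum_mod (r : List Char) :
    ∀ k : Int, (pvWsum k r) % 3 = ((if k % 2 = 0 then 1 else 2) * pvN r) % 3 := by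
  induction r with
  | nil => intro k; simp [pvWsum, pvN]
  | cons c t ih =>
    intro k
    simp only [pvWsum, pvN]
    have ih' := ih (k + 1)
    have hk : k % 2 = 0 ∨ k % 2 = 1 := by omega
    rcases hk with h | h
    · simp only [if_pos h] at ⊢
      simp only [if_neg (show ¬ (k + 1) % 2 = 0 by omega)] at ih'
      omega
    · simp only [if_neg (show ¬ k % 2 = 0 by omega)] at ⊢
      simp only [if_pos (show (k + 1) % 2 = 0 by omega)] at ih'
      omega

-- ===== VERDICT (by name: the statement is the Claim_ definition above) =====
theorem fsm_mod3_spec : Claim_equal_fsm_mod3 := by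
  intro s _ hpre
  unfold Pre_fsm_mod3 at hpre
  rw [List.all_eq_true] at hpre
  have hbin : ∀ c ∈ s.toList, c = '0' ∨ c = '1' := by
    intro c hc
    have := hpre c hc
    simpa [Bool.or_eq_true] using this
  have hbinr : ∀ c ∈ s.toList.reverse, c = '0' ∨ c = '1' := by
    intro c hc; exact hbin c (List.mem_reverse.mp hc)
  unfold Spec_fsm_mod3 fsm_mod3 fsm_mod3_alt
  have hA := pvFoldA s.toList hbin 0
  rw [show ((0:Int) % 3) = 0 from rfl] at hA
  rw [hA, pvFoldB s.toList.reverse hbinr 0 0 (le_refl 0)]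
  simp only [Option.map_some, Option.getD_some, zero_add]
  rw [PySem.Int.mod_eq_emod_of_pos (show (0:Int) < 3 by norm_num)]
  have hw := pvWsum_mod s.toList.reverse 0
  norm_num at hw
  rw [hw, ← pvRevVal s.toList.reverse, List.reverse_reverse]
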